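-- pv_equiv track=rewrite | github.com/cdreetz/rlptx | grpo/kernelbench/evaluator.py | extract_kernel_methods
-- ===== SOURCE A (Python) =====
-- def extract_kernel_methods(text: str) -> tuple[str, str]:
--     if "triton_kernel" in text and "tritton_wrapper" in text:
--         kernel_start = text.find("triton_kernel")
--         wrapper_start = text.find("tritton_wrapper")
--
--         wrapper_lines = text[wrapper_start:].split('\n')
--         wrapper_end = wrapper_start
--         for i, line in enumerate(wrapper_lines):
--             if 'return' in line:
--                 wrapper_end += sum(len(l) + 1 for l in wrapper_lines[:i+1])
--                 break
--         if wrapper_end == wrapper_start:  # No return found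
--             wrapper_end = len(text)
--
--         kernel_code = text[kernel_start:wrapper_start].strip()
--         wrapper_code = text[wrapper_start:wrapper_end].strip()
--         return kernel_code, wrapper_code
--     else:
--         return text, ""
-- ===== SOURCE B (Python) =====
-- def extract_kernel_methods(text: str) -> tuple[str, str]:
--     if "triton_kernel" in text and "tritton_wrapper" in text:
--         kernel_start = text.find("triton_kernel")
--         wrapper_start = text.find("tritton_wrapper")
--         idx = text.find("return", wrapper_start)
--         if idx == -1:
--             wrapper_end = len(text)
--         else:
--             nl = text.find("\n", idx)
--             wrapper_end = len(text) if nl == -1 else nl + 1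
--         kernel_code = text[kernel_start:wrapper_start].strip()
--         wrapper_code = text[wrapper_start:wrapper_end].strip()
--         return kernel_code, wrapper_code
--     else:
--         return text, ""
-- ===== Notes on version B (the rewrite author's own statement) =====
-- stated objective: simpler
-- what changed: B drops A's line-splitting plus enumerate loop with a prefix-sum of line lengths and locates wrapper_end directly with two substring searches (the first occurrence of the return keyword at or after wrapper_start, then its terminating newline), relying on the final strip() to absorb A's harmless one-past-the-end offset on an unterminated final line.
import Mathlib
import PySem

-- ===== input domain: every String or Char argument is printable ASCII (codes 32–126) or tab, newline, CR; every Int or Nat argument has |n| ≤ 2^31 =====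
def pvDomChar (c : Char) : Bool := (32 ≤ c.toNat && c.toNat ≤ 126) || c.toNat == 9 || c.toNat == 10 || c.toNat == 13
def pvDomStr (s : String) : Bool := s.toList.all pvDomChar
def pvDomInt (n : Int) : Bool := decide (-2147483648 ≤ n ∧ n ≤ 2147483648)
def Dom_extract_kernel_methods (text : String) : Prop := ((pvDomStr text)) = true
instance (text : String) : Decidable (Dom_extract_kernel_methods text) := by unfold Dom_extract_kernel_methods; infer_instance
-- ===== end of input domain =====

-- B replaces A's split-into-lines + enumerate + prefix-sum loop by two direct text.find calls
-- (the first 'return' at or after wrapper_start, then its terminating newline); objective: simpler.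

-- ===== PORT A =====
-- the for-loop over enumerate(wrapper_lines) with break: the first line containing 'return'
-- adds sum(len(l)+1 for l in wrapper_lines[:i+1]) to wrapper_end and stops
def ekFindEnd (all : List String) : List String → Nat → Int → Int
  | [], _, we => we
  | line :: rest, i, we =>
    if PySem.Str.isIn "return" line then
      we + ((all.take (i+1)).map (fun l => PySem.Str.len l + 1)).sum
    else ekFindEnd all rest (i+1) we

def extract_kernel_methods (text : String) : String × String :=
  if PySem.Str.isIn "triton_kernel" text && PySem.Str.isIn "tritton_wrapper" text then
    let kernel_start := PySem.Str.find text "triton_kernel"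
    let wrapper_start := PySem.Str.find text "tritton_wrapper"
    -- text[wrapper_start:].split('\n'); the sep "\n" is non-empty, so split? is some (getD only totalises)
    let wrapper_lines := (PySem.Str.split? (PySem.Str.slice text (some wrapper_start) none) "\n").getD []
    let wrapper_end := ekFindEnd wrapper_lines wrapper_lines 0 wrapper_start
    let wrapper_end := if wrapper_end = wrapper_start then PySem.Str.len text else wrapper_end
    let kernel_code := PySem.Str.strip (PySem.Str.slice text (some kernel_start) (some wrapper_start))
    let wrapper_code := PySem.Str.strip (PySem.Str.slice text (some wrapper_start) (some wrapper_end))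
    (kernel_code, wrapper_code)
  else (text, "")

-- ===== PORT B =====
def extract_kernel_methods_alt (text : String) : String × String :=
  if PySem.Str.isIn "triton_kernel" text && PySem.Str.isIn "tritton_wrapper" text then
    let kernel_start := PySem.Str.find text "triton_kernel"
    let wrapper_start := PySem.Str.find text "tritton_wrapper"
    let idx := PySem.Str.findFrom text "return" wrapper_start
    let wrapper_end : Int :=
      if idx = -1 then PySem.Str.len text
      else
        let nl := PySem.Str.findFrom text "\n" idx
        if nl = -1 then PySem.Str.len text else nl + 1
    let kernel_code := PySem.Str.strip (PySem.Str.slice text (some kernel_start) (some wrapper_start))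
    let wrapper_code := PySem.Str.strip (PySem.Str.slice text (some wrapper_start) (some wrapper_end))
    (kernel_code, wrapper_code)
  else (text, "")

-- ===== PRECONDITION & SPEC =====
def Spec_extract_kernel_methods (text : String) (out : String × String) : Prop := out = extract_kernel_methods_alt text
instance (text : String) (out : String × String) : Decidable (Spec_extract_kernel_methods text out) := by unfold Spec_extract_kernel_methods; infer_instance

-- ===== CLAIM (what is proved, stated in full; the proofs are below) =====
def Claim_equal_extract_kernel_methods : Prop := ∀ (text : String), Dom_extract_kernel_methods text → Spec_extract_kernel_methods text (extract_kernel_methods text)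

-- ===== LEMMAS AND PROOFS =====

def splitNl : List Char → List (List Char)
  | [] => [[]]
  | c :: rest => if c = '\n' then [] :: splitNl rest else (splitNl rest).modifyHead (c :: ·)

theorem splitNl_ne_nil (t : List Char) : splitNl t ≠ [] := by
  induction t with
  | nil => simp [splitNl]
  | cons c rest ih =>
    simp only [splitNl]
    split
    · simp
    · cases h : splitNl rest with
      | nil => exact absurd h ih
      | cons a b => simp

theorem find_go_spec (sub : List Char) : ∀ (l : List Char) (k : Nat),
    PySem.Chars.find.go sub l k =
      if PySem.Chars.find l sub = -1 then -1 else k + PySem.Chars.find l sub := by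
  intro l
  induction l with
  | nil =>
    intro k
    rw [PySem.Chars.find.go]
    simp [PySem.Chars.find, PySem.Chars.find.go]
    split <;> simp
  | cons c r ih =>
    intro k
    rw [PySem.Chars.find.go]
    conv_rhs => rw [PySem.Chars.find, PySem.Chars.find.go]
    split
    · simp
    · rw [ih (k+1), ih 1]
      have h9 := PySem.Chars.neg_one_le_find r sub
      split <;> push_cast <;> omega

theorem find_cons (sub : List Char) (c : Char) (r : List Char) :
    PySem.Chars.find (c :: r) sub =
      if List.isPrefixOf sub (c :: r) then 0
      else if PySem.Chars.find r sub = -1 then -1 else 1 + PySem.Chars.find r sub := by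
  rw [PySem.Chars.find, PySem.Chars.find.go]
  split
  · simp
  · rw [find_go_spec]
    split <;> simp

theorem prefix_append_sep (sub l0 rest : List Char) (hs : '\n' ∉ sub) :
    sub <+: l0 ++ '\n' :: rest ↔ sub <+: l0 := by
  constructor
  · intro h
    by_cases hl : sub.length ≤ l0.length
    · have h2 : sub <+: (l0 ++ '\n' :: rest).take l0.length := by
        exact List.prefix_take_iff.mpr ⟨h, hl⟩
      simpa [List.take_append] using h2
    · exfalso
      apply hs
      have he := h.getElem (i := l0.length) (by omega)
      have h3 : sub[l0.length]'(by omega) = '\n' := by rw [he]; simp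
      exact h3 ▸ List.getElem_mem _
  · intro h
    exact h.trans (List.prefix_append _ _)

theorem find_no_nl (t : List Char) (h : '\n' ∉ t) : PySem.Chars.find t ['\n'] = -1 := by
  rw [PySem.Chars.find_eq_neg_one_iff]
  intro hi
  exact h (hi.sublist.subset (by simp))

theorem find_nl_append (a rest : List Char) (h : '\n' ∉ a) :
    PySem.Chars.find (a ++ '\n' :: rest) ['\n'] = a.length := by
  induction a with
  | nil =>
    rw [List.nil_append, find_cons]
    simp [List.isPrefixOf]
  | cons c a' ih =>
    rw [List.cons_append, find_cons]
    have hc : c ≠ '\n' := by intro he; exact h (by simp [he])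
    have h' : '\n' ∉ a' := by intro he; exact h (by simp [he])
    rw [ih h']
    simp only [List.isPrefixOf, Bool.and_eq_true, beq_iff_eq]
    rw [if_neg]
    · simp; omega
    · intro hx
      exact hc hx.1.symm

theorem find_append_sep (sub : List Char) (hmem : '\n' ∉ sub) (hne : sub ≠ []) :
    ∀ (l0 rest : List Char),
    PySem.Chars.find (l0 ++ '\n' :: rest) sub =
      if PySem.Chars.find l0 sub = -1 then
        (if PySem.Chars.find rest sub = -1 then -1
         else (l0.length : Int) + 1 + PySem.Chars.find rest sub)
      else PySem.Chars.find l0 sub := by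
  intro l0
  induction l0 with
  | nil =>
    intro rest
    have hf : PySem.Chars.find [] sub = -1 := by
      rw [PySem.Chars.find_eq_neg_one_iff]
      intro hi
      exact hne (List.eq_nil_of_sublist_nil hi.sublist)
    rw [hf, List.nil_append, find_cons]
    have hp : ¬ List.isPrefixOf sub ('\n' :: rest) = true := by
      intro hp
      have := (List.isPrefixOf_iff_prefix.mp hp)
      match sub, hne with
      | c :: s', _ =>
        have : c = '\n' := by
          have := this.getElem (i := 0) (by simp)
          simpa using this
        exact hmem (by simp [this])
    simp [hp]
  | cons c l0' ih =>
    intro rest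
    rw [List.cons_append, find_cons, find_cons (r := l0')]
    have hpiff : List.isPrefixOf sub (c :: (l0' ++ '\n' :: rest)) = List.isPrefixOf sub (c :: l0') := by
      rcases Bool.eq_false_or_eq_true (List.isPrefixOf sub (c :: l0')) with hb | hb <;> rw [hb]
      · rw [List.isPrefixOf_iff_prefix] at hb ⊢
        exact (prefix_append_sep sub (c :: l0') rest hmem).mpr hb
      · rw [Bool.eq_false_iff]
        intro hp
        rw [Bool.eq_false_iff] at hb
        apply hb
        rw [List.isPrefixOf_iff_prefix] at hp ⊢
        exact (prefix_append_sep sub (c :: l0') rest hmem).mp (by simpa using hp)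
    rw [hpiff, ih rest]
    have h1 := PySem.Chars.neg_one_le_find l0' sub
    have h2 := PySem.Chars.neg_one_le_find rest sub
    split
    · rfl
    · simp only [List.length_cons]
      split <;> split <;> (try split) <;> push_cast <;> omega

theorem splitOn_go_spec : ∀ (fuel : Nat) (l cur : List Char) (acc : List (List Char)),
    l.length < fuel →
    PySem.Chars.splitOn.go ['\n'] fuel l cur acc =
      acc.reverse ++ (splitNl l).modifyHead (fun x => cur.reverse ++ x) := by
  intro fuel
  induction fuel with
  | zero => intro l cur acc h; omega
  | succ fuel ih =>
    intro l cur acc h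
    match l with
    | [] =>
      rw [PySem.Chars.splitOn.go]
      · simp [splitNl]
      · omega
    | c :: rest =>
      rw [PySem.Chars.splitOn.go]
      by_cases hc : c = '\n'
      · rw [if_pos (by simp [List.isPrefixOf, hc])]
        rw [ih _ _ _ (by simp at h ⊢; omega)]
        subst hc
        simp only [splitNl, if_pos rfl, List.reverse_cons, List.append_assoc, List.modifyHead_cons, List.reverse_nil, List.nil_append]
        cases hs : splitNl rest with
        | nil => exact absurd hs (splitNl_ne_nil rest)
        | cons a b => simp [hs]
      · rw [if_neg (by simp [List.isPrefixOf]; intro he; exact hc he.symm)]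
        rw [ih _ _ _ (by simp at h ⊢; omega)]
        simp only [splitNl, if_neg hc]
        cases hs : splitNl rest with
        | nil => exact absurd hs (splitNl_ne_nil rest)
        | cons a b => simp

theorem splitOn_eq_splitNl (t : List Char) : PySem.Chars.splitOn t ['\n'] = splitNl t := by
  rw [PySem.Chars.splitOn, splitOn_go_spec _ _ _ _ (by omega)]
  cases hs : splitNl t with
  | nil => exact absurd hs (splitNl_ne_nil t)
  | cons a b => simp

theorem splitNl_no_nl (t : List Char) (h : '\n' ∉ t) : splitNl t = [t] := by
  induction t with
  | nil => rfl
  | cons c rest ih =>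
    have hc : c ≠ '\n' := fun he => h (by simp [he])
    have h' : '\n' ∉ rest := fun he => h (by simp [he])
    simp [splitNl, if_neg hc, ih h']

theorem splitNl_append (l0 rest : List Char) (h : '\n' ∉ l0) :
    splitNl (l0 ++ '\n' :: rest) = l0 :: splitNl rest := by
  induction l0 with
  | nil => simp [splitNl]
  | cons c l0' ih =>
    have hc : c ≠ '\n' := fun he => h (by simp [he])
    have h' : '\n' ∉ l0' := fun he => h (by simp [he])
    simp only [List.cons_append, splitNl, if_neg hc, ih h']
    simp

def retC : List Char := ['r', 'e', 't', 'u', 'r', 'n']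

def specEnd : List (List Char) → Option Int
  | [] => none
  | l :: rest =>
    if PySem.Chars.isIn retC l then some ((l.length : Int) + 1)
    else (specEnd rest).map (fun m => (l.length : Int) + 1 + m)

def bSpec (t : List Char) : Option Int :=
  if PySem.Chars.find t retC = -1 then none
  else if PySem.Chars.find (t.drop (PySem.Chars.find t retC).toNat) ['\n'] = -1 then
    some ((t.length : Int) + 1)
  else some (PySem.Chars.find t retC + PySem.Chars.find (t.drop (PySem.Chars.find t retC).toNat) ['\n'] + 1)


theorem ekFindEnd_spec (all : List String) : ∀ (lines : List String) (i : Nat) (we : Int),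
    lines = all.drop i →
    ekFindEnd all lines i we =
      match specEnd (lines.map String.toList) with
      | none => we
      | some m => we + (((all.take i).map (fun l => PySem.Str.len l + 1)).sum) + m := by
  intro lines
  induction lines with
  | nil => intro i we _; rfl
  | cons line rest ih =>
    intro i we hd
    have hget : all[i]? = some line := by
      rw [← List.head?_drop, ← hd]; rfl
    have htake : all.take (i+1) = all.take i ++ [line] := by
      rw [List.take_succ, hget]; rfl
    have hdrop : rest = all.drop (i+1) := by
      have := congrArg List.tail hd
      simpa [List.tail_drop] using this
    have hIn : PySem.Str.isIn "return" line = PySem.Chars.isIn retC line.toList := by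
      rw [PySem.Str.isIn_eq]; rfl
    rw [ekFindEnd]
    simp only [List.map_cons, specEnd, hIn]
    by_cases hr : PySem.Chars.isIn retC line.toList
    · rw [if_pos hr, if_pos hr, htake]
      simp [PySem.Str.len_eq]
      ring
    · rw [if_neg hr, if_neg hr, ih (i+1) we hdrop]
      cases hs : specEnd (rest.map String.toList) with
      | none => simp
      | some m =>
        simp only [Option.map_some, htake]
        simp [PySem.Str.len_eq]
        ring

theorem bSpec_pos {t : List Char} {m : Int} (h : bSpec t = some m) : 0 < m := by
  rw [bSpec] at h
  have h1 := PySem.Chars.neg_one_le_find t retC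
  have h2 := PySem.Chars.neg_one_le_find (t.drop (PySem.Chars.find t retC).toNat) ['\n']
  split at h
  · simp at h
  · split at h <;> (simp only [Option.some_inj] at h; omega)

theorem specEnd_splitNl (t : List Char) : specEnd (splitNl t) = bSpec t := by
    have hmem : '\n' ∉ retC := by decide
    have hne : retC ≠ [] := by decide
    by_cases h : '\n' ∈ t
    · -- t = l0 ++ '\n' :: rest
      have hd_ne : t.dropWhile (· != '\n') ≠ [] := by
        intro he
        have h2 := List.takeWhile_append_dropWhile (p := (· != '\n')) (l := t)
        rw [he, List.append_nil] at h2
        rw [← h2] at h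
        have := List.mem_takeWhile_imp h
        simp at this
      have hhead : (t.dropWhile (· != '\n')).head hd_ne = '\n' := by
        have := List.head_dropWhile_not (· != '\n') hd_ne
        simpa using this
      have ht : t = t.takeWhile (· != '\n') ++ '\n' :: (t.dropWhile (· != '\n')).tail := by
        conv_lhs => rw [← List.takeWhile_append_dropWhile (p := (· != '\n')) (l := t)]
        congr 1
        obtain ⟨a, d', hd⟩ := List.exists_cons_of_ne_nil hd_ne
        have ha : a = '\n' := by
          have h5 : (t.dropWhile (· != '\n')).head? = some '\n' := by
            rw [List.head?_eq_head hd_ne, hhead]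
          rw [hd] at h5
          simpa using h5
        rw [hd, ha]
        simp
      have hl0 : '\n' ∉ t.takeWhile (· != '\n') := by
        intro hm
        have := List.mem_takeWhile_imp hm
        simp at this
      have hlen : (t.dropWhile (· != '\n')).tail.length < t.length := by
        conv_rhs => rw [ht]
        simp
        omega
      have IH := specEnd_splitNl (t.dropWhile (· != '\n')).tail
      set l0 := t.takeWhile (· != '\n') with hl0def
      set rest := (t.dropWhile (· != '\n')).tail with hrest
      have hlen2 : t.length = l0.length + 1 + rest.length := by
        have := congrArg List.length ht
        simp only [List.length_append, List.length_cons] at this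
        omega
      rw [ht, splitNl_append _ _ hl0]
      rw [specEnd, IH]
      conv_rhs => rw [bSpec]
      rw [find_append_sep retC hmem hne l0 rest]
      have hfl0 := PySem.Chars.neg_one_le_find l0 retC
      have hfl0' := PySem.Chars.find_le_length l0 retC
      have hfr := PySem.Chars.neg_one_le_find rest retC
      by_cases hf0 : PySem.Chars.find l0 retC = -1
      · have hIn : PySem.Chars.isIn retC l0 = false := by
          simp [PySem.Chars.isIn, hf0]
        rw [if_neg (by simp [hIn]), if_pos hf0]
        rw [bSpec]
        by_cases hfr0 : PySem.Chars.find rest retC = -1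
        · simp [if_pos hfr0]
        · simp only [if_neg hfr0]
          rw [if_neg (show ¬((l0.length : Int) + 1 + PySem.Chars.find rest retC = -1) by omega)]
          have hfnn : (0:Int) ≤ PySem.Chars.find rest retC := by omega
          have htn : ((l0.length : Int) + 1 + PySem.Chars.find rest retC).toNat
              = l0.length + 1 + (PySem.Chars.find rest retC).toNat := by omega
          have hdrop : List.drop ((l0.length : Int) + 1 + PySem.Chars.find rest retC).toNat (l0 ++ '\n' :: rest)
              = List.drop (PySem.Chars.find rest retC).toNat rest := by
            rw [htn, List.drop_append]
            rw [List.drop_eq_nil_of_le (by omega)]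
            have hx : l0.length + 1 + (PySem.Chars.find rest retC).toNat - l0.length
                = (PySem.Chars.find rest retC).toNat + 1 := by omega
            rw [hx, List.drop_succ_cons]
            simp
          rw [hdrop]
          have hnl := PySem.Chars.neg_one_le_find (List.drop (PySem.Chars.find rest retC).toNat rest) ['\n']
          by_cases hnl0 : PySem.Chars.find (List.drop (PySem.Chars.find rest retC).toNat rest) ['\n'] = -1
          · rw [if_pos hnl0, if_pos hnl0]
            simp only [Option.map_some, Option.some_inj, List.length_append, List.length_cons]
            push_cast
            omega
          · rw [if_neg hnl0, if_neg hnl0]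
            simp only [Option.map_some, Option.some_inj]
            push_cast
            ring
      · have hIn : PySem.Chars.isIn retC l0 = true := by
          simp [PySem.Chars.isIn, hf0]
        rw [if_pos (by simp [hIn]), if_neg hf0]
        have hfnn : (0:Int) ≤ PySem.Chars.find l0 retC := by omega
        have hdrop : List.drop (PySem.Chars.find l0 retC).toNat (l0 ++ '\n' :: rest)
            = List.drop (PySem.Chars.find l0 retC).toNat l0 ++ '\n' :: rest := by
          rw [List.drop_append_of_le_length (by omega)]
        rw [hdrop]
        have hnonl : '\n' ∉ List.drop (PySem.Chars.find l0 retC).toNat l0 := by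
          intro hm
          exact hl0 (List.mem_of_mem_drop hm)
        rw [find_nl_append _ _ hnonl]
        rw [if_neg (by omega)]
        simp [List.length_drop]
        omega
    · rw [splitNl_no_nl t h, specEnd, bSpec]
      by_cases hf : PySem.Chars.find t retC = -1
      · have hIn : PySem.Chars.isIn retC t = false := by
          simp [PySem.Chars.isIn, hf]
        rw [if_neg (by simp [hIn]), if_pos hf]
        simp [specEnd]
      · have hIn : PySem.Chars.isIn retC t = true := by
          simp [PySem.Chars.isIn, hf]
        rw [if_pos (by simp [hIn]), if_neg hf]
        have hnonl : '\n' ∉ List.drop (PySem.Chars.find t retC).toNat t := by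
          intro hm
          exact h (List.mem_of_mem_drop hm)
        rw [find_no_nl _ hnonl, if_pos rfl]

  termination_by t.length
  decreasing_by
    have hx := hlen
    simp only [List.length_tail] at hx ⊢
    omega

theorem clampIdx_of_length_le {n : Nat} {b : Int} (h : (n : Int) ≤ b) :
    PySem.List.clampIdx n b = n := by
  rw [PySem.List.clampIdx]
  rw [if_neg (by omega)]
  omega

theorem slice_stop_clamp (s : List Char) (a b1 b2 : Int) (h1 : (s.length:Int) ≤ b1) (h2 : (s.length:Int) ≤ b2) :
    PySem.List.slice s (some a) (some b1) = PySem.List.slice s (some a) (some b2) := by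
  rw [PySem.List.slice, PySem.List.slice]
  rw [clampIdx_of_length_le h1, clampIdx_of_length_le h2]

theorem ek_eq_alt (text : String) : extract_kernel_methods text = extract_kernel_methods_alt text := by
  rw [extract_kernel_methods, extract_kernel_methods_alt]
  by_cases hb : (PySem.Str.isIn "triton_kernel" text && PySem.Str.isIn "tritton_wrapper" text) = true
  case neg => rw [if_neg hb, if_neg hb]
  case pos =>
    rw [if_pos hb, if_pos hb]
    simp only []
    have hw : PySem.Str.isIn "tritton_wrapper" text = true := by
      have := hb
      simp only [Bool.and_eq_true] at this
      exact this.2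
    -- basic facts about ws
    have hwne : PySem.Str.find text "tritton_wrapper" ≠ -1 := by
      rw [PySem.Str.isIn_eq, PySem.Chars.isIn] at hw
      rw [PySem.Str.find_eq]
      simpa using hw
    have hge := PySem.Chars.neg_one_le_find text.toList "tritton_wrapper".toList
    have hle := PySem.Chars.find_le_length text.toList "tritton_wrapper".toList
    rw [PySem.Str.find_eq text "tritton_wrapper"] at hwne ⊢
    set wsI := PySem.Chars.find text.toList "tritton_wrapper".toList with hwsI
    have hws0 : 0 ≤ wsI := by omega
    set w := wsI.toNat with hwdef
    have hwcast : wsI = (w : Int) := (Int.toNat_of_nonneg hws0).symm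
    have hwlen : w ≤ text.toList.length := by omega
    set tl := text.toList.drop w with htl
    -- the tail string and its lines
    have htail : (PySem.Str.slice text (some wsI) none).toList = tl := by
      rw [PySem.Str.toList_slice, PySem.Chars.slice_eq_listSlice, PySem.List.slice_from _ hws0]
    have hsplit : PySem.Str.split? (PySem.Str.slice text (some wsI) none) "\n"
        = some ((splitNl tl).map String.ofList) := by
      rw [PySem.Str.split?, PySem.Chars.split?, if_neg (by simp)]
      rw [htail]
      show some ((PySem.Chars.splitOn tl ['\n']).map String.ofList) = _
      rw [splitOn_eq_splitNl]
    rw [hsplit]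
    simp only [Option.getD_some]
    set lines := (splitNl tl).map String.ofList with hlinesdef
    have hlines : lines.map String.toList = splitNl tl := by
      rw [hlinesdef, List.map_map]
      simp [Function.comp_def]
    have hek : ekFindEnd lines lines 0 wsI
        = (match bSpec tl with | none => wsI | some m => wsI + m) := by
      rw [ekFindEnd_spec lines lines 0 wsI List.drop_zero.symm, hlines, specEnd_splitNl]
      cases bSpec tl <;> simp
    have hretc : ("return" : String).toList = retC := by decide
    have hFge := PySem.Chars.neg_one_le_find tl retC
    have hFle := PySem.Chars.find_le_length tl retC
    have hlen : (tl.length : Int) = (text.toList.length : Int) - w := by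
      rw [htl, List.length_drop]; omega
    have hidx : PySem.Str.findFrom text "return" wsI
        = if PySem.Chars.find tl retC = -1 then -1 else (w : Int) + PySem.Chars.find tl retC := by
      rw [PySem.Str.findFrom_eq, hretc, hwcast, PySem.Chars.findFrom_natCast _ _ w hwlen, htl]
    rw [hidx]
    by_cases hf : PySem.Chars.find tl retC = -1
    · -- no 'return' after wrapper_start: both take len(text)
      rw [if_pos hf]
      have hbs : bSpec tl = none := by rw [bSpec, if_pos hf]
      have hA : ekFindEnd lines lines 0 wsI = wsI := by rw [hek, hbs]
      rw [hA, if_pos rfl, if_pos rfl]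
    · -- 'return' found
      rw [if_neg hf]
      set F := PySem.Chars.find tl retC with hFdef
      have hF0 : 0 ≤ F := by omega
      have hwf : w + F.toNat ≤ text.toList.length := by omega
      have hnl : PySem.Str.findFrom text "\n" ((w : Int) + F)
          = if PySem.Chars.find (tl.drop F.toNat) ['\n'] = -1 then -1
            else ((w + F.toNat : Nat) : Int) + PySem.Chars.find (tl.drop F.toNat) ['\n'] := by
        rw [PySem.Str.findFrom_eq]
        have hc : (w : Int) + F = ((w + F.toNat : Nat) : Int) := by push_cast; omega
        rw [hc, PySem.Chars.findFrom_natCast _ _ (w + F.toNat) hwf]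
        rw [htl, List.drop_drop]
        rfl
      rw [hnl]
      have hq := PySem.Chars.neg_one_le_find (tl.drop F.toNat) ['\n']
      by_cases hnl0 : PySem.Chars.find (tl.drop F.toNat) ['\n'] = -1
      · -- matching line is the last line: A gets len+1, B gets len; .strip of equal clamped slices
        rw [if_pos hnl0]
        have hbs : bSpec tl = some ((tl.length : Int) + 1) := by
          rw [bSpec, if_neg hf, if_pos hnl0]
        have hA : ekFindEnd lines lines 0 wsI = wsI + ((tl.length : Int) + 1) := by rw [hek, hbs]
        have hm := bSpec_pos hbs
        rw [hA, if_neg (by omega), if_neg (show ¬((w:Int) + F = -1) by omega), if_pos rfl]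
        refine congrArg₂ Prod.mk rfl (congrArg PySem.Str.strip ?_)
        have h1 : (PySem.Str.slice text (some wsI) (some (wsI + ((tl.length : Int) + 1)))).toList
            = (PySem.Str.slice text (some wsI) (some (PySem.Str.len text))).toList := by
          rw [PySem.Str.toList_slice, PySem.Str.toList_slice]
          rw [PySem.Chars.slice_eq_listSlice, PySem.Chars.slice_eq_listSlice]
          rw [PySem.Str.len_eq]
          exact slice_stop_clamp _ _ _ _ (by omega) (by omega)
        have h2 := congrArg String.ofList h1
        simpa using h2
      · rw [if_neg hnl0]
        set q := PySem.Chars.find (tl.drop F.toNat) ['\n'] with hqdef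
        have hbs : bSpec tl = some (F + q + 1) := by
          rw [bSpec, if_neg hf, if_neg hnl0]
        have hA : ekFindEnd lines lines 0 wsI = wsI + (F + q + 1) := by rw [hek, hbs]
        have hm := bSpec_pos hbs
        rw [hA, if_neg (by omega)]
        have hc : wsI + (F + q + 1) = ((w + F.toNat : Nat) : Int) + q + 1 := by push_cast; omega
        rw [hc, if_neg (show ¬((w:Int) + F = -1) by omega),
           if_neg (show ¬(((w + F.toNat : Nat) : Int) + q = -1) by omega)]

-- ===== VERDICT (by name: the statement is the Claim_ definition above) =====
theorem extract_kernel_methods_spec : Claim_equal_extract_kernel_methods := by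
  intro text _
  unfold Spec_extract_kernel_methods
  exact ek_eq_alt text
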